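-- pv_equiv track=rewrite | github.com/vikas11kendre/microfrontend-ecommerce-poc | .agents/skills/graphify/export.py | _cypher_escape
-- ===== SOURCE A (Python) =====
-- def _cypher_escape(s: str) -> str:
--     """Escape a string for safe embedding in a Cypher single-quoted literal.
--
--     Handles all characters that could prematurely terminate the literal or
--     inject control sequences:
--       - `\\` and `'` (literal terminators)
--       - newlines/CRs (would break the per-line statement framing)
--       - NUL/control bytes (defensive — Neo4j errors on raw NULs)
--
--     Also strips any leading/trailing whitespace that would let an attacker
--     break the `;`-terminated statement boundary used by `cypher-shell`.
--     Closing `}` and `)` are NOT special inside a single-quoted Cypher string,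
--     so escaping the quote and backslash correctly is sufficient (a `}` inside
--     a properly-closed `'...'` literal is just a character) — but we previously
--     missed `\\n` / `\\r` which DO let a payload break out of the statement
--     line and inject a fresh MATCH/DELETE on the following line. See F-008.
--     """
--     # First normalise: drop NUL and other C0 control chars except tab.
--     s = "".join(ch for ch in s if ch >= " " or ch == "\t")
--     return (
--         s.replace("\\", "\\\\")
--          .replace("'", "\\'")
--          .replace("\n", "\\n")
--          .replace("\r", "\\r")
--     )
-- ===== SOURCE B (Python) =====
-- _CTRL_TABLE = {i: None for i in range(32) if i != 9}
-- _CTRL_TABLE[ord("\\")] = "\\\\"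
-- _CTRL_TABLE[ord("'")] = "\\'"
--
--
-- def _cypher_escape(s: str) -> str:
--     # One table-driven pass: delete C0 controls (except tab), escape \ and '.
--     return s.translate(_CTRL_TABLE)
-- ===== Notes on version B (the rewrite author's own statement) =====
-- stated objective: idiomatic
-- what changed: Replaces the filter-comprehension plus four sequential str.replace passes with a single precomputed str.translate table (delete C0 controls except tab, map backslash and quote to their escapes) applied in one pass.
import Mathlib
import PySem

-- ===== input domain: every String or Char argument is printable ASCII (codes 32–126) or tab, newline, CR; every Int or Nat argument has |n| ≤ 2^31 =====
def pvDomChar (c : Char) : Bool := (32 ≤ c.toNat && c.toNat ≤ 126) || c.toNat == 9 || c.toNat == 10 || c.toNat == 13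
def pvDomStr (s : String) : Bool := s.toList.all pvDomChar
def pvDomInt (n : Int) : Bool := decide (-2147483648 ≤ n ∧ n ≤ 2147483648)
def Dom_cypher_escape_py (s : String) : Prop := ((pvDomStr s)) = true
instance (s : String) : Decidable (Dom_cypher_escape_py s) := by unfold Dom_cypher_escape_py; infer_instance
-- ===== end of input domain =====

-- B replaces A's filter comprehension + four sequential str.replace passes by a single
-- table-driven pass (str.translate); equivalence of the return values is proved below.

-- ===== PORT A =====
-- A: s = "".join(ch for ch in s if ch >= " " or ch == "\t"), then four .replace passes.
def cypher_escape_py (s : String) : String :=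
  let s' := String.ofList (s.toList.filter (fun ch => ch ≥ ' ' || ch == '\t'))
  PySem.Str.replace
    (PySem.Str.replace
      (PySem.Str.replace
        (PySem.Str.replace s' "\\" "\\\\")
        "'" "\\'")
      "\n" "\\n")
    "\r" "\\r"

-- ===== PORT B =====
-- B: one translation table keyed by ordinal — delete C0 controls except tab (ord 9),
-- map '\' and the single quote to their escapes; applied in a single pass (str.translate).
def pvTranslateChar (c : Char) : List Char :=
  if c.toNat < 32 && c.toNat != 9 then []            -- table maps these ordinals to None (delete)
  else if c = '\\' then ['\\', '\\']                  -- table: ord('\\') -> "\\\\"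
  else if c = '\'' then ['\\', '\'']                  -- table: ord("'") -> "\\'"
  else [c]                                            -- not in the table: kept unchanged

def cypher_escape_py_alt (s : String) : String :=
  String.ofList (s.toList.flatMap pvTranslateChar)

-- ===== PRECONDITION & SPEC =====
def Spec_cypher_escape_py (s : String) (out : String) : Prop := out = cypher_escape_py_alt s
instance (s : String) (out : String) : Decidable (Spec_cypher_escape_py s out) := by unfold Spec_cypher_escape_py; infer_instance

-- ===== CLAIM (what is proved, stated in full; the proofs are below) =====
def Claim_equal_cypher_escape_py : Prop := ∀ (s : String), Dom_cypher_escape_py s → Spec_cypher_escape_py s (cypher_escape_py s)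

-- ===== LEMMAS AND PROOFS =====

-- Characterisation of PySem replace with a single-char pattern: it is a flatMap.
theorem replace_go_single (a : Char) (new : List Char) :
    ∀ (fuel : Nat) (l acc : List Char), l.length ≤ fuel →
      PySem.Chars.replace.go [a] new fuel l acc
        = acc.reverse ++ l.flatMap (fun c => if c = a then new else [c]) := by
  intro fuel
  induction fuel with
  | zero =>
    intro l acc h
    have : l = [] := List.eq_nil_of_length_eq_zero (Nat.le_zero.mp h)
    subst this
    simp [PySem.Chars.replace.go]
  | succ n ih =>
    intro l acc h
    cases l with
    | nil => simp [PySem.Chars.replace.go]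
    | cons c t =>
      have ht : t.length ≤ n := by simpa using Nat.succ_le_succ_iff.mp h
      by_cases hc : c = a
      · subst hc
        have hpre : [c].isPrefixOf (c :: t) = true := by simp [List.isPrefixOf]
        simp only [PySem.Chars.replace.go, hpre]
        rw [ih _ _ (by simpa using ht)]
        simp
      · have hpre : [a].isPrefixOf (c :: t) = false := by
          simp [List.isPrefixOf]
          exact fun h' => (hc h'.symm).elim
        simp only [PySem.Chars.replace.go, hpre]
        rw [if_neg (by simp)]
        rw [ih _ _ ht]
        simp [hc]

theorem replace_single (l : List Char) (a : Char) (new : List Char) :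
    PySem.Chars.replace l [a] new = l.flatMap (fun c => if c = a then new else [c]) := by
  have := replace_go_single a new l.length l [] (le_refl _)
  simpa [PySem.Chars.replace] using this

-- filter-then-flatMap fuses into one flatMap that emits [] on filtered-out elements
theorem filter_flatMap (p : Char → Bool) (f : Char → List Char) (l : List Char) :
    (l.filter p).flatMap f = l.flatMap (fun c => if p c then f c else []) := by
  induction l with
  | nil => simp
  | cons c t ih =>
    by_cases hp : p c = true
    · simp [hp, ih]
    · simp [hp, ih]

-- the per-character composition of A's filter and four replaces equals B's table
theorem combined_eq (c : Char) :
    (if (c ≥ ' ' || c == '\t') then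
      (if c = '\\' then ['\\','\\'] else [c]).flatMap
        (fun x => (if x = '\'' then ['\\','\''] else [x]).flatMap
          (fun y => (if y = '\n' then ['\\','n'] else [y]).flatMap
            (fun d => if d = '\r' then ['\\','r'] else [d])))
     else []) = pvTranslateChar c := by
  have hge : (' ' ≤ c) ↔ (32 ≤ c.toNat) := by
    rw [Char.le_def, UInt32.le_iff_toNat_le]
    exact Iff.rfl
  by_cases hk : (c ≥ ' ' || c == '\t') = true
  · -- kept by the filter: c is not a C0 control other than tab
    have hn32 : ¬ (c.toNat < 32 && c.toNat != 9) = true := by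
      rcases Bool.or_eq_true_iff.mp hk with h | h
      · have : 32 ≤ c.toNat := hge.mp (of_decide_eq_true h)
        simp; omega
      · have : c = '\t' := by exact_mod_cast of_decide_eq_true h
        subst this; decide
    by_cases hb : c = '\\'
    · subst hb; simp [pvTranslateChar]
    · by_cases hq : c = '\''
      · subst hq; simp [pvTranslateChar]
      · -- plain char; kept chars are never '\n' or '\r'
        have hnl : c ≠ '\n' := by
          intro h'; subst h'; exact hn32 (by decide)
        have hcr : c ≠ '\r' := by
          intro h'; subst h'; exact hn32 (by decide)
        simp [hk, hb, hq, hnl, hcr, pvTranslateChar, hn32]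
  · -- dropped by the filter: c is a C0 control other than tab, so the table deletes it
    have h32 : (c.toNat < 32 && c.toNat != 9) = true := by
      have h1 : ¬ (' ' ≤ c) := fun h => hk (by simp [h])
      have h2 : c ≠ '\t' := fun h => hk (by simp [h])
      have hlt : c.toNat < 32 := by
        have : ¬ 32 ≤ c.toNat := fun h => h1 (hge.mpr h)
        omega
      have h9 : c.toNat ≠ 9 := by
        intro h'
        apply h2
        apply Char.ext
        apply UInt32.toNat_inj.mp
        simpa using h'
      simp [hlt, h9]
    simp [hk, pvTranslateChar, h32]

-- ===== VERDICT (by name: the statement is the Claim_ definition above) =====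
theorem cypher_escape_py_spec : Claim_equal_cypher_escape_py := by
  intro s _
  unfold Spec_cypher_escape_py cypher_escape_py cypher_escape_py_alt
  simp only [PySem.Str.replace, String.toList_ofList]
  have e1 : "\\".toList = ['\\'] := rfl
  have e2 : "'".toList = ['\''] := rfl
  have e3 : "\n".toList = ['\n'] := rfl
  have e4 : "\r".toList = ['\r'] := rfl
  have e5 : "\\\\".toList = ['\\', '\\'] := rfl
  have e6 : "\\'".toList = ['\\', '\''] := rfl
  have e7 : "\\n".toList = ['\\', 'n'] := rfl
  have e8 : "\\r".toList = ['\\', 'r'] := rfl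
  rw [e1, e2, e3, e4, e5, e6, e7, e8]
  rw [replace_single, replace_single, replace_single, replace_single]
  rw [List.flatMap_assoc, List.flatMap_assoc, List.flatMap_assoc]
  rw [filter_flatMap]
  congr 1
  apply List.flatMap_congr
  intro c _
  exact combined_eq c
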